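-- pv_equiv track=rewrite | github.com/AhmedAlyElGhannam/Git-Calculator-Assignment | config.py | find_header_guard_indices
-- ===== SOURCE A (Python) =====
-- HEADER_GUARD_START = "#ifndef CONFIGURATION_H_"
--
-- HEADER_GUARD_END = "#endif"
--
-- def find_header_guard_indices(lines):
--     """Find the indices of the header guard start and end."""
--     start_index = None
--     end_index = None
--
--     for i, line in enumerate(lines):
--         if HEADER_GUARD_START in line:
--             start_index = i
--         if HEADER_GUARD_END in line:
--             end_index = i
--
--     return start_index, end_index
-- ===== SOURCE B (Python) =====
-- HEADER_GUARD_START = "#ifndef CONFIGURATION_H_"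
--
-- HEADER_GUARD_END = "#endif"
--
-- def find_header_guard_indices(lines):
--     """Find the indices of the header guard start and end (last occurrence of each)
--     by collecting all matching indices and taking the last of each list."""
--     lines = list(lines)
--     starts = [i for i, line in enumerate(lines) if HEADER_GUARD_START in line]
--     ends = [i for i, line in enumerate(lines) if HEADER_GUARD_END in line]
--     return (starts[-1] if starts else None, ends[-1] if ends else None)
-- ===== Notes on version B (the rewrite author's own statement) =====
-- stated objective: alternative
-- what changed: Replaces A's single accumulator loop that overwrites two indices on every match with two declarative comprehensions collecting all matching indices per marker, returning the last element of each list.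
import Mathlib
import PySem

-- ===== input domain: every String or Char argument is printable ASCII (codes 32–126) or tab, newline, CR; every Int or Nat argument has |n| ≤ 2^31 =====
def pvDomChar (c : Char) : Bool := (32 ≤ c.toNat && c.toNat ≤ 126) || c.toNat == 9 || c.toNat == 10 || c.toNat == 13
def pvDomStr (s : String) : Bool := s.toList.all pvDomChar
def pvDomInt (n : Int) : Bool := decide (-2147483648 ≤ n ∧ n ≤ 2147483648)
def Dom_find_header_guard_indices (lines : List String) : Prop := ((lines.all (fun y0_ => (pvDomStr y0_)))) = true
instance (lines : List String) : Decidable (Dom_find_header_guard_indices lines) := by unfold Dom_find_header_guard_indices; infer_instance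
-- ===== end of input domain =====

-- B is an alternative of the same cost: two comprehensions collect the matching
-- indices per marker, and the last element of each list is returned.

def hgStart : String := "#ifndef CONFIGURATION_H_"
def hgEnd : String := "#endif"

-- ===== PORT A =====
-- forward pass: each match overwrites the stored index
def findA_loop : List (Int × String) → Option Int × Option Int → Option Int × Option Int
  | [], st => st
  | (i, line) :: rest, (s, e) =>
      findA_loop rest
        ((if PySem.Str.isIn hgStart line then some i else s),
         (if PySem.Str.isIn hgEnd line then some i else e))

def find_header_guard_indices (lines : List String) : Option Int × Option Int :=
  findA_loop (PySem.List.enumerate lines) (none, none)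

-- ===== PORT B =====
-- comprehension: all indices whose line contains the marker; answer = last of that list
def matchIdxs (sub : String) (lines : List String) : List Int :=
  ((PySem.List.enumerate lines).filter (fun p => PySem.Str.isIn sub p.2)).map Prod.fst

def find_header_guard_indices_alt (lines : List String) : Option Int × Option Int :=
  ((matchIdxs hgStart lines).getLast?, (matchIdxs hgEnd lines).getLast?)

-- ===== PRECONDITION & SPEC =====
def Spec_find_header_guard_indices (lines : List String) (out : Option Int × Option Int) : Prop := out = find_header_guard_indices_alt lines
instance (lines : List String) (out : Option Int × Option Int) : Decidable (Spec_find_header_guard_indices lines out) := by unfold Spec_find_header_guard_indices; infer_instance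

-- ===== CLAIM (what is proved, stated in full; the proofs are below) =====
def Claim_equal_find_header_guard_indices : Prop := ∀ (lines : List String), Dom_find_header_guard_indices lines → Spec_find_header_guard_indices lines (find_header_guard_indices lines)

-- ===== LEMMAS AND PROOFS =====

def lastHit (sub : String) (xs : List (Int × String)) : Option Int :=
  (((xs.filter (fun p => PySem.Str.isIn sub p.2))).map Prod.fst).getLast?

theorem getLast?_cons_or {α : Type} (a : α) (l : List α) :
    (a :: l).getLast? = l.getLast?.or (some a) := by
  induction l generalizing a with
  | nil => rfl
  | cons b t ih =>
      rw [List.getLast?_cons_cons, ih b]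
      cases t.getLast? <;> rfl

theorem lastHit_cons (sub : String) (i : Int) (line : String) (rest : List (Int × String)) :
    lastHit sub ((i, line) :: rest) =
      (lastHit sub rest).or (if PySem.Str.isIn sub line then some i else none) := by
  unfold lastHit
  by_cases h : PySem.Chars.isIn sub.toList line.toList
  · simp only [List.filter_cons, PySem.Str.isIn, h, if_pos, List.map_cons, getLast?_cons_or]
  · simp only [List.filter_cons, PySem.Str.isIn, h, Bool.false_eq_true, if_neg,
      not_false_iff, Option.or_none]

theorem findA_loop_eq (xs : List (Int × String)) (s e : Option Int) :
    findA_loop xs (s, e) =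
      ((lastHit hgStart xs).or s, (lastHit hgEnd xs).or e) := by
  induction xs generalizing s e with
  | nil => simp [findA_loop, lastHit]
  | cons p rest ih =>
      obtain ⟨i, line⟩ := p
      simp only [findA_loop, ih, lastHit_cons]
      by_cases h1 : PySem.Chars.isIn hgStart.toList line.toList <;>
        by_cases h2 : PySem.Chars.isIn hgEnd.toList line.toList <;>
        cases hs : lastHit hgStart rest <;> cases he : lastHit hgEnd rest <;>
        simp_all [Option.or]

-- ===== VERDICT (by name: the statement is the Claim_ definition above) =====
theorem find_header_guard_indices_spec : Claim_equal_find_header_guard_indices := by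
  intro lines _
  unfold Spec_find_header_guard_indices find_header_guard_indices find_header_guard_indices_alt
  rw [findA_loop_eq]
  simp [lastHit, matchIdxs]
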